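-- pv_equiv track=rewrite | github.com/AP-MI-2021/lab-3-GeorgeRad | main.py | get_longest_all_palindromes
-- ===== SOURCE A (Python) =====
-- def is_palindrome(n):
--     """
--     Verificam daca un numar intreg este palindrom
--     :param n: numar intreg
--     :return: True sau False
--     """
--     clone_n = n
--     oglindit = 0
--     while clone_n > 0:
--         oglindit = oglindit * 10 + clone_n % 10
--         clone_n = clone_n // 10
--     if n == oglindit:
--         return True
--     return False
--
-- def all_list_is_formed_with_palindromes(lista):
--     """
--     Verificam daca o lista este formata doar din palindroame
--     :param lista: lista de numere intregi
--     :return: True sau False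
--     """
--     for i in lista:
--         if is_palindrome(i) is False:
--             return False
--     return True
--
-- def get_longest_all_palindromes(lista):
--     """
--     Cautarea celei mai lungi secvente de numere care sunt palindroame
--     :param lista: lista de numere intregi
--     :return: secventa de numere intregi
--     """
--     subsecventa_maxima = []
--     lungime_lista = len(lista)
--     for i in range(lungime_lista):
--         for j in range(i, lungime_lista):
--             if all_list_is_formed_with_palindromes(lista[i:j + 1]) and len(lista[i: j + 1]) > len(subsecventa_maxima):
--                 subsecventa_maxima = lista[i: j + 1]
--     return subsecventa_maxima
-- ===== SOURCE B (Python) =====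
-- def is_palindrome(n):
--     clone_n = n
--     oglindit = 0
--     while clone_n > 0:
--         oglindit = oglindit * 10 + clone_n % 10
--         clone_n = clone_n // 10
--     return n == oglindit
--
-- def get_longest_all_palindromes(lista):
--     """Single left-to-right pass: grow the current run of palindromes,
--     remember the first run that became strictly longest."""
--     best = []
--     cur = []
--     for x in lista:
--         if is_palindrome(x):
--             cur = cur + [x]
--             if len(cur) > len(best):
--                 best = cur
--         else:
--             cur = []
--     return best
-- ===== Notes on version B (the rewrite author's own statement) =====
-- stated objective: faster
-- what changed: Replaced A's enumeration of all O(n^2) slices (each re-checked element by element for palindromes) with a single left-to-right pass that grows the current palindrome run and keeps the first run that becomes strictly longest.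
import Mathlib
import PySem

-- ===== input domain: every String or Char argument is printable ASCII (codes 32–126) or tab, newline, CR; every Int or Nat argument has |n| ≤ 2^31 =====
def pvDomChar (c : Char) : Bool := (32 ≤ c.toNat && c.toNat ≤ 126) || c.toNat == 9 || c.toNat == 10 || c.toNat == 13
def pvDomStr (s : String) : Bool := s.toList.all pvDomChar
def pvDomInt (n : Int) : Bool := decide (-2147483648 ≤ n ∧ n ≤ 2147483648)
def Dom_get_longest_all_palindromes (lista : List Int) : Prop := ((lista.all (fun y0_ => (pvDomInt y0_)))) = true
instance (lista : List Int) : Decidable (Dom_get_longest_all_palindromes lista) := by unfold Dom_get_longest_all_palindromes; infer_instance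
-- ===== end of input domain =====

-- B replaces A's all-slices scan by a single pass that grows the current
-- palindrome run and keeps the first strictly longest one (objective: faster).

-- ===== PORT A =====

-- while clone_n > 0: oglindit = oglindit*10 + clone_n % 10; clone_n = clone_n // 10
def mirrorLoop (clone_n oglindit : Int) : Int :=
  if h : clone_n > 0 then
    mirrorLoop (PySem.Int.floordiv clone_n 10) (oglindit * 10 + PySem.Int.mod clone_n 10)
  else oglindit
termination_by clone_n.toNat
decreasing_by
  have e : PySem.Int.floordiv clone_n 10 = clone_n / 10 :=
    PySem.Int.floordiv_eq_ediv_of_pos (by norm_num)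
  rw [e]; omega

def is_palindrome (n : Int) : Bool := decide (n = mirrorLoop n 0)

def all_list_is_formed_with_palindromes : List Int → Bool
  | [] => true
  | x :: xs =>
      if is_palindrome x = false then false
      else all_list_is_formed_with_palindromes xs

def get_longest_all_palindromes (lista : List Int) : List Int :=
  let lungime_lista : Int := (lista.length : Int)
  (PySem.List.pyRange 0 lungime_lista 1).foldl (fun subsecventa_maxima i =>
    (PySem.List.pyRange i lungime_lista 1).foldl (fun subsecventa_maxima j =>
      if all_list_is_formed_with_palindromes
            (PySem.List.slice lista (some i) (some (j + 1))) = true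
          ∧ (PySem.List.slice lista (some i) (some (j + 1))).length
              > subsecventa_maxima.length
      then PySem.List.slice lista (some i) (some (j + 1))
      else subsecventa_maxima) subsecventa_maxima) []

-- ===== PORT B =====

def get_longest_all_palindromes_alt (lista : List Int) : List Int :=
  (lista.foldl (fun (st : List Int × List Int) x =>
      if is_palindrome x then
        let cur := st.2 ++ [x]
        (if cur.length > st.1.length then cur else st.1, cur)
      else (st.1, [])) (([] : List Int), ([] : List Int))).1

-- ===== PRECONDITION & SPEC =====
def Spec_get_longest_all_palindromes (lista : List Int) (out : List Int) : Prop := out = get_longest_all_palindromes_alt lista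
instance (lista : List Int) (out : List Int) : Decidable (Spec_get_longest_all_palindromes lista out) := by unfold Spec_get_longest_all_palindromes; infer_instance

-- ===== CLAIM (what is proved, stated in full; the proofs are below) =====
def Claim_equal_get_longest_all_palindromes : Prop := ∀ (lista : List Int), Dom_get_longest_all_palindromes lista → Spec_get_longest_all_palindromes lista (get_longest_all_palindromes lista)

-- ===== LEMMAS AND PROOFS =====

-- Common characterisation: fold over the candidates "palindrome run starting at
-- position i", by increasing start position, keeping the first strictly longer one.
def F : List Int → List Int → List Int
  | [], best => best
  | x :: xs, best =>
      F xs (if ((x :: xs).takeWhile is_palindrome).length > best.length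
            then (x :: xs).takeWhile is_palindrome else best)

lemma allp_take_iff (t : List Int) : ∀ (k : Nat), k ≤ t.length →
    (all_list_is_formed_with_palindromes (t.take k) = true
      ↔ k ≤ (t.takeWhile is_palindrome).length) := by
  induction t with
  | nil => intro k hk; simp at hk; simp [hk, all_list_is_formed_with_palindromes]
  | cons x xs ih =>
    intro k hk
    cases k with
    | zero => simp [all_list_is_formed_with_palindromes]
    | succ k =>
      simp only [List.take_succ_cons, all_list_is_formed_with_palindromes]
      by_cases hx : is_palindrome x = true
      · rw [if_neg (by simp [hx]), List.takeWhile_cons_of_pos hx]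
        simp only [List.length_cons]
        rw [ih k (by simpa using hk)]
        omega
      · rw [if_pos (by simpa using hx), List.takeWhile_cons_of_neg (by simpa using hx)]
        simp

lemma take_length_takeWhile (p : Int → Bool) (t : List Int) :
    t.take (t.takeWhile p).length = t.takeWhile p := by
  induction t with
  | nil => simp
  | cons x xs ih =>
    by_cases hx : p x
    · simp [List.takeWhile_cons_of_pos hx, ih]
    · simp [List.takeWhile_cons_of_neg hx]

-- A's inner fold, reindexed over slice lengths 1..M of the suffix t
lemma innerAux (t : List Int) : ∀ (M : Nat), M ≤ t.length → ∀ (best : List Int),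
    (List.range M).foldl (fun b k =>
      if all_list_is_formed_with_palindromes (t.take (k + 1)) = true
          ∧ (t.take (k + 1)).length > b.length
      then t.take (k + 1) else b) best
    = if min M (t.takeWhile is_palindrome).length > best.length
      then t.take (min M (t.takeWhile is_palindrome).length) else best := by
  intro M
  induction M with
  | zero => intro _ best; simp
  | succ M ih =>
    intro hM best
    rw [List.range_succ, List.foldl_append, ih (by omega)]
    simp only [List.foldl_cons, List.foldl_nil]
    set r := (t.takeWhile is_palindrome).length with hr
    have hrlen : r ≤ t.length := by
      rw [hr]; exact (List.takeWhile_prefix is_palindrome).length_le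
    have hlen : (t.take (M + 1)).length = M + 1 := by simp; omega
    by_cases hpal : M + 1 ≤ r
    · have hap : all_list_is_formed_with_palindromes (t.take (M + 1)) = true :=
        (allp_take_iff t (M + 1) hM).mpr hpal
      have hminM : min M r = M := by omega
      have hminM1 : min (M + 1) r = M + 1 := by omega
      rw [hminM, hminM1]
      by_cases hb : M > best.length
      · rw [if_pos hb, if_pos ⟨hap, by simp [hlen]⟩, if_pos (by omega)]
      · rw [if_neg hb]
        by_cases hb1 : M + 1 > best.length
        · rw [if_pos ⟨hap, by omega⟩, if_pos hb1]
        · rw [if_neg (by omega), if_neg hb1]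
    · have hap : ¬ (all_list_is_formed_with_palindromes (t.take (M + 1)) = true) := by
        rw [allp_take_iff t (M + 1) hM]; omega
      have hmin : min (M + 1) r = min M r := by omega
      rw [if_neg (by rintro ⟨h1, _⟩; exact hap h1), hmin]

-- A's inner loop at start position i takes the palindrome run at i if longer
lemma inner_eq (l : List Int) (i : Nat) (hi : i ≤ l.length) (best : List Int) :
    (PySem.List.pyRange (i : Int) ((l.length : Nat) : Int) 1).foldl (fun b j =>
      if all_list_is_formed_with_palindromes
            (PySem.List.slice l (some (i : Int)) (some (j + 1))) = true
          ∧ (PySem.List.slice l (some (i : Int)) (some (j + 1))).length > b.length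
      then PySem.List.slice l (some (i : Int)) (some (j + 1)) else b) best
    = if ((l.drop i).takeWhile is_palindrome).length > best.length
      then (l.drop i).takeWhile is_palindrome else best := by
  have hs : ∀ (k : Nat), PySem.List.slice l (some (i : Int)) (some ((i : Int) + (k : Int) + 1))
      = (l.drop i).take (k + 1) := by
    intro k
    have e : ((i : Int) + (k : Int) + 1) = (i : Int) + ((k + 1 : Nat) : Int) := by
      push_cast; ring
    rw [e, PySem.List.slice_natCast_add]
  rw [PySem.List.pyRange_one, List.foldl_map]
  have hM : (((l.length : Nat) : Int) - (i : Int)).toNat = l.length - i := by omega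
  rw [hM]
  simp only [hs]
  have hlen : l.length - i ≤ (l.drop i).length := by simp
  rw [innerAux (l.drop i) (l.length - i) hlen best]
  have hmin : min (l.length - i) ((l.drop i).takeWhile is_palindrome).length
      = ((l.drop i).takeWhile is_palindrome).length := by
    have := (List.takeWhile_prefix is_palindrome (l := l.drop i)).length_le
    simp at this ⊢; omega
  rw [hmin, take_length_takeWhile]

-- A's outer loop over start positions is exactly F
lemma outerAux (l : List Int) : ∀ (best : List Int),
    (List.range l.length).foldl (fun b i =>
      if ((l.drop i).takeWhile is_palindrome).length > b.length
      then (l.drop i).takeWhile is_palindrome else b) best = F l best := by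
  induction l with
  | nil => intro best; simp [F]
  | cons x xs ih =>
    intro best
    rw [List.length_cons, List.range_succ_eq_map, List.foldl_cons, List.foldl_map]
    simp only [List.drop_succ_cons, List.drop_zero]
    rw [F]
    exact ih _

lemma A_eq_F (l : List Int) : get_longest_all_palindromes l = F l [] := by
  unfold get_longest_all_palindromes
  dsimp only
  rw [PySem.List.pyRange_one, List.foldl_map]
  have h0 : ((l.length : Int) - 0).toNat = l.length := by omega
  rw [h0]
  simp only [zero_add]
  rw [PySem.List.foldl_congr_mem (List.range l.length) _
    (fun b (i : Nat) =>
      if ((l.drop i).takeWhile is_palindrome).length > b.length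
      then (l.drop i).takeWhile is_palindrome else b) []
    (by intro acc k hk
        exact inner_eq l k (Nat.le_of_lt (List.mem_range.mp hk)) acc)]
  exact outerAux l []

lemma F_idem (l : List Int) (b : List Int) :
    F l (if (l.takeWhile is_palindrome).length > b.length
         then l.takeWhile is_palindrome else b) = F l b := by
  cases l with
  | nil => simp [F]
  | cons x xs =>
    rw [F, F]
    congr 1
    by_cases h : ((x :: xs).takeWhile is_palindrome).length > b.length
    · rw [if_pos h]; simp
    · rw [if_neg h, if_neg h]

-- which of the four lists B's step can hand on, as a pure if-picking fact
lemma pick (c d cur' best : List Int)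
    (hdc : d.length ≤ c.length) (hcc : cur'.length ≤ c.length)
    (heq : cur'.length = c.length → cur' = c) :
    (if c.length > (if cur'.length > best.length then cur' else best).length then c
     else (if cur'.length > best.length then cur' else best))
    = (if d.length > (if c.length > best.length then c else best).length then d
       else (if c.length > best.length then c else best)) := by
  split_ifs <;> first | rfl | omega | (exact (heq (by omega)).symm) | (exact heq (by omega))

-- invariant of B's single pass: cur is the pending run, best the first maximum so far
lemma B_inv (l : List Int) : ∀ (best cur : List Int), cur.length ≤ best.length →
    (l.foldl (fun (st : List Int × List Int) x =>
      if is_palindrome x then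
        let cur := st.2 ++ [x]
        (if cur.length > st.1.length then cur else st.1, cur)
      else (st.1, [])) (best, cur)).1
    = F l (if (cur ++ l.takeWhile is_palindrome).length > best.length
           then cur ++ l.takeWhile is_palindrome else best) := by
  induction l with
  | nil =>
    intro best cur h
    simp only [List.foldl_nil, List.takeWhile_nil, List.append_nil, F]
    rw [if_neg (by omega)]
  | cons x xs ih =>
    intro best cur h
    rw [List.foldl_cons]
    by_cases hx : is_palindrome x = true
    · simp only [hx, if_true]
      rw [ih (if (cur ++ [x]).length > best.length then cur ++ [x] else best) (cur ++ [x])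
        (by split_ifs with hh <;> omega)]
      rw [List.takeWhile_cons_of_pos hx, F, List.takeWhile_cons_of_pos hx]
      have hassoc : (cur ++ [x]) ++ xs.takeWhile is_palindrome
          = cur ++ x :: xs.takeWhile is_palindrome := by simp
      rw [hassoc]
      congr 1
      refine pick _ _ _ _ (by simp) (by simp) ?_
      intro hlen
      have htw : xs.takeWhile is_palindrome = [] := by
        apply List.length_eq_zero_iff.mp
        simp only [List.length_append, List.length_cons, List.length_nil] at hlen
        omega
      rw [htw]
    · simp only [hx, Bool.false_eq_true, if_false]
      rw [ih best [] (by simp)]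
      simp only [List.nil_append]
      rw [F_idem, F]
      simp only [List.takeWhile_cons_of_neg (by simpa using hx), List.append_nil,
        List.length_nil]
      rw [if_neg (show ¬ cur.length > best.length by omega)]
      simp

lemma B_eq_F (l : List Int) : get_longest_all_palindromes_alt l = F l [] := by
  unfold get_longest_all_palindromes_alt
  rw [B_inv l [] [] (by simp)]
  simp only [List.nil_append, List.length_nil]
  exact F_idem l []

-- ===== VERDICT (by name: the statement is the Claim_ definition above) =====
theorem get_longest_all_palindromes_spec : Claim_equal_get_longest_all_palindromes := by
  intro lista _
  unfold Spec_get_longest_all_palindromes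
  rw [A_eq_F, B_eq_F]
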